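-- pv_equiv track=rewrite | github.com/lalit527/DS | Sequence5/CTCI/8-Rec-DP/1_steps.py | _min_num_steps_memo
-- ===== SOURCE A (Python) =====
-- def _min_num_steps_memo(n, memo):
--   if n <= 0:
--     return 0
--   if n == 1 or n == 2 or n == 3:
--     return 1
--
--   if memo[n] > -1:
--     return memo[n]
--
--   return 1 + min(_min_num_steps_memo(n - 1, memo), _min_num_steps_memo(n - 2, memo), _min_num_steps_memo(n - 3, memo))
-- ===== SOURCE B (Python) =====
-- def _min_num_steps_memo(n, memo):
--   if n <= 0:
--     return 0
--   if n <= 3: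
--     return 1
--   a = b = c = 1
--   for k in range(4, n + 1):
--     v = memo[k]
--     if v <= -1:
--       v = 1 + min(a, b, c)
--     a, b, c = b, c, v
--   return c
-- ===== Notes on version B (the rewrite author's own statement) =====
-- stated objective: alternative
-- what changed: Replaced the triple-branch top-down recursion (whose memo is read but never written) by a single bottom-up pass from 4 to n keeping only the last three values in a rolling triple.
import Mathlib
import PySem

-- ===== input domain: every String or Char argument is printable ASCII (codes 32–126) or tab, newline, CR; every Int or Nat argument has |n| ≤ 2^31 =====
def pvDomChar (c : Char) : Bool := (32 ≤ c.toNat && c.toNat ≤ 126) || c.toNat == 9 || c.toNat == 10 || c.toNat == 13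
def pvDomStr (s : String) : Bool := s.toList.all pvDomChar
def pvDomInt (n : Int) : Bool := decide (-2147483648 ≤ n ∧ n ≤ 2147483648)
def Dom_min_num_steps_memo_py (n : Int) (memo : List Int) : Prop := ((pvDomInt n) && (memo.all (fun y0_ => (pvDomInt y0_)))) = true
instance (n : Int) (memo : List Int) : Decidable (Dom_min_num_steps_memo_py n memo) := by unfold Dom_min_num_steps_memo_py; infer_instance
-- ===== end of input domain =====

-- B replaces A's top-down triple recursion (memo is read, never written) by one
-- bottom-up pass 4..n with a rolling triple of the last three values (objective: alternative).

-- ===== PORT A =====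
def min_num_steps_memo_py (n : Int) (memo : List Int) : Int :=
  if _h0 : n ≤ 0 then 0
  else if _h1 : n = 1 ∨ n = 2 ∨ n = 3 then 1
  else
    -- memo[n]: Python raises IndexError when out of range; Pre_ excludes that, default 0 unreachable inside Pre_
    let m := (PySem.List.pyGet? memo n).getD 0
    if m > -1 then m
    else
      1 + min (min_num_steps_memo_py (n - 1) memo)
            (min (min_num_steps_memo_py (n - 2) memo) (min_num_steps_memo_py (n - 3) memo))
termination_by n.toNat
decreasing_by all_goals omega

-- ===== PORT B =====
def min_num_steps_memo_py_alt (n : Int) (memo : List Int) : Int :=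
  if n ≤ 0 then 0
  else if n ≤ 3 then 1
  else
    let s := (PySem.List.pyRange 4 (n + 1) 1).foldl
      (fun (s : Int × Int × Int) k =>
        let v := (PySem.List.pyGet? memo k).getD 0
        let v := if v ≤ -1 then 1 + min s.1 (min s.2.1 s.2.2) else v
        (s.2.1, s.2.2, v)) (1, 1, 1)
    s.2.2

-- ===== PRECONDITION & SPEC =====
-- Pre_ excludes exactly the inputs where the Python A raises IndexError (n ≥ 4 with n ≥ len(memo)).
def Pre_min_num_steps_memo_py (n : Int) (memo : List Int) : Prop :=
  n ≤ 3 ∨ n < memo.length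
instance (n : Int) (memo : List Int) : Decidable (Pre_min_num_steps_memo_py n memo) := by
  unfold Pre_min_num_steps_memo_py; infer_instance
def pvWitness_min_num_steps_memo_py : Int × List Int := (5, [-1, -1, -1, -1, -1, -1])
def Spec_min_num_steps_memo_py (n : Int) (memo : List Int) (out : Int) : Prop := out = min_num_steps_memo_py_alt n memo
instance (n : Int) (memo : List Int) (out : Int) : Decidable (Spec_min_num_steps_memo_py n memo out) := by unfold Spec_min_num_steps_memo_py; infer_instance

-- ===== CLAIM (what is proved, stated in full; the proofs are below) =====
def Claim_equal_min_num_steps_memo_py : Prop := ∀ (n : Int) (memo : List Int), Dom_min_num_steps_memo_py n memo → Pre_min_num_steps_memo_py n memo → Spec_min_num_steps_memo_py n memo (min_num_steps_memo_py n memo)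

-- ===== LEMMAS AND PROOFS =====

theorem A_nonpos (n : Int) (memo : List Int) (h : n ≤ 0) :
    min_num_steps_memo_py n memo = 0 := by
  rw [min_num_steps_memo_py]; simp [h]

theorem A_base (n : Int) (memo : List Int) (h : n = 1 ∨ n = 2 ∨ n = 3) :
    min_num_steps_memo_py n memo = 1 := by
  rw [min_num_steps_memo_py]
  have h0 : ¬ n ≤ 0 := by omega
  simp [h0, h]

theorem A_step (n : Int) (memo : List Int) (h : 4 ≤ n) :
    min_num_steps_memo_py n memo =
      (let m := (PySem.List.pyGet? memo n).getD 0
       if m > -1 then m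
       else 1 + min (min_num_steps_memo_py (n - 1) memo)
              (min (min_num_steps_memo_py (n - 2) memo) (min_num_steps_memo_py (n - 3) memo))) := by
  rw [min_num_steps_memo_py]
  have h0 : ¬ n ≤ 0 := by omega
  have h1 : ¬ (n = 1 ∨ n = 2 ∨ n = 3) := by omega
  simp [h0, h1]

-- the loop body of B's port, named for the invariant proof
def pvStep (memo : List Int) (s : Int × Int × Int) (k : Int) : Int × Int × Int :=
  let v := (PySem.List.pyGet? memo k).getD 0
  let v := if v ≤ -1 then 1 + min s.1 (min s.2.1 s.2.2) else v
  (s.2.1, s.2.2, v)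

-- loop invariant: after folding range(4, m+1), the state holds A's values at m-2, m-1, m
theorem fold_inv (memo : List Int) (m : Int) (h3 : 3 ≤ m)
    (hlen : m = 3 ∨ m < memo.length) :
    (PySem.List.pyRange 4 (m + 1) 1).foldl (pvStep memo) (1, 1, 1) =
      (min_num_steps_memo_py (m - 2) memo,
       min_num_steps_memo_py (m - 1) memo,
       min_num_steps_memo_py m memo) := by
  have hm : m = 3 + ((m - 3).toNat : Int) := by omega
  rw [hm] at hlen ⊢
  generalize (m - 3).toNat = t at *
  clear hm h3 m
  induction t with
  | zero =>
      simp only [Int.natCast_zero, Int.add_zero]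
      rw [PySem.List.pyRange_one_eq_nil (by omega)]
      simp [List.foldl]
      refine ⟨?_, ?_, ?_⟩ <;> rw [A_base] <;> omega
  | succ t ih =>
      push_cast
      rw [show (3 : Int) + ((t : Int) + 1) + 1 = (3 + (t : Int) + 1) + 1 by ring,
          PySem.List.pyRange_one_succ_right (by omega), List.foldl_append]
      have hprev : (3 : Int) + (t : Int) = 3 ∨ (3 : Int) + (t : Int) < memo.length := by
        rcases hlen with h | h
        · omega
        · omega
      rw [ih hprev]
      -- one step of the loop at k = 3 + t + 1 equals A's recurrence there
      have hk : (4 : Int) ≤ 3 + (t : Int) + 1 := by omega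
      have hA := A_step (3 + (t : Int) + 1) memo hk
      simp only [List.foldl, pvStep]
      have e1 : 3 + (t : Int) + 1 - 1 = 3 + (t : Int) := by ring
      have e2 : 3 + (t : Int) + 1 - 2 = 3 + (t : Int) - 1 := by ring
      have e3 : 3 + (t : Int) + 1 - 3 = 3 + (t : Int) - 2 := by ring
      rw [show (3 : Int) + ((t : Int) + 1) - 2 = 3 + (t : Int) - 1 by ring,
          show (3 : Int) + ((t : Int) + 1) - 1 = 3 + (t : Int) by ring,
          show (3 : Int) + ((t : Int) + 1) = 3 + (t : Int) + 1 by ring,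
          hA, e1, e2, e3]
      refine Prod.ext rfl (Prod.ext rfl ?_)
      simp only
      set v := (PySem.List.pyGet? memo (3 + (t : Int) + 1)).getD 0 with hv
      by_cases hvle : v ≤ -1
      · rw [if_pos hvle, if_neg (by omega : ¬ v > -1)]
        have hmin : ∀ a b c : Int, min a (min b c) = min c (min b a) := by
          intro a b c; simp only [min_def]; split_ifs <;> omega
        rw [hmin]
      · rw [if_neg hvle, if_pos (by omega : v > -1)]

-- ===== VERDICT (by name: the statement is the Claim_ definition above) =====
theorem min_num_steps_memo_py_spec : Claim_equal_min_num_steps_memo_py := by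
  intro n memo _ hpre
  unfold Spec_min_num_steps_memo_py min_num_steps_memo_py_alt
  by_cases h0 : n ≤ 0
  · simp [h0, A_nonpos n memo h0]
  · by_cases h3 : n ≤ 3
    · simp only [h0, if_false, h3, if_true]
      exact A_base n memo (by omega)
    · simp only [h0, if_false, h3, if_false]
      have hlen : n = 3 ∨ n < memo.length := by
        rcases hpre with h | h
        · omega
        · right; exact h
      have := fold_inv memo n (by omega) hlen
      rw [show (PySem.List.pyRange 4 (n+1) 1).foldl
        (fun (s : Int × Int × Int) k =>
          let v := (PySem.List.pyGet? memo k).getD 0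
          let v := if v ≤ -1 then 1 + min s.1 (min s.2.1 s.2.2) else v
          (s.2.1, s.2.2, v)) (1,1,1) =
        (PySem.List.pyRange 4 (n+1) 1).foldl (pvStep memo) (1,1,1) from rfl, this]
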